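-- pv_equiv track=rewrite | github.com/saatchi190499/prodcast-worker | petex_client/gap_tools.py | find_trunks_and_branches
-- ===== SOURCE A (Python) =====
-- from collections import defaultdict
--
-- def build_directed_graph(edges):
--     """
--     Build directed adjacency: EndA -> EndB
--     """
--     graph = defaultdict(list)
--     for eq_uid, (enda, endb, etype) in edges.items():
--         graph[enda].append((eq_uid, endb, etype))  # only A→B
--     return graph
--
-- def find_trunks_and_branches(edges, uid_type):
--     """
--     Identify trunklines (always open) and branch pipes (toggle).
--     Returns: (trunks, branches)
--     - trunks: set of pipe_uids
--     - branches: {branch_point_uid: [pipe_uids]}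
--     """
--     graph = build_directed_graph(edges)
--     trunks = set()
--     branches = defaultdict(list)
--
--     wells = [u for u, t in uid_type.items() if t == "WELL"]
--     visited = set()
--
--     def dfs(node):
--         if node in visited:
--             return
--         visited.add(node)
--         outs = graph.get(node, [])
--         if len(outs) == 1:
--             # Single continuation → trunk
--             pipe_uid, endb, etype = outs[0]
--             trunks.add(pipe_uid)
--             dfs(endb)
--         elif len(outs) > 1:
--             # Branch point → multiple pipes
--             for (pipe_uid, endb, etype) in outs:
--                 branches[node].append(pipe_uid)
--                 dfs(endb)
--
--     for w in wells:
--         dfs(w)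
--
--     return trunks, branches
-- ===== SOURCE B (Python) =====
-- from collections import defaultdict
--
-- def build_directed_graph(edges):
--     """
--     Build directed adjacency: EndA -> EndB
--     """
--     graph = defaultdict(list)
--     for eq_uid, (enda, endb, etype) in edges.items():
--         graph[enda].append((eq_uid, endb, etype))  # only A->B
--     return graph
--
-- def find_trunks_and_branches(edges, uid_type):
--     """
--     Two-phase version: first collect the DFS preorder of every node reachable
--     from the wells (iterative, explicit stack); then classify each node of
--     that order independently (1 out -> trunk pipe, >1 outs -> branch point).
--     """
--     graph = build_directed_graph(edges)
--
--     # Phase 1: DFS preorder (stack pops match the recursive visiting order).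
--     order = []
--     seen = set()
--     stack = [u for u, t in uid_type.items() if t == "WELL"][::-1]
--     while stack:
--         node = stack.pop()
--         if node in seen:
--             continue
--         seen.add(node)
--         order.append(node)
--         for _, endb, _ in reversed(graph.get(node, [])):
--             stack.append(endb)
--
--     # Phase 2: per-node classification, in visiting order.
--     trunks = set()
--     branches = defaultdict(list)
--     for node in order:
--         outs = graph.get(node, [])
--         if len(outs) == 1:
--             trunks.add(outs[0][0])
--         elif len(outs) > 1:
--             branches[node] = [pipe_uid for pipe_uid, _, _ in outs]
--     return trunks, branches
-- ===== Notes on version B (the rewrite author's own statement) =====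
-- stated objective: alternative
-- what changed: A's single recursive dfs that classifies while it walks is replaced by two separate passes: an iterative explicit-stack traversal that only collects the DFS preorder of nodes reachable from wells, followed by a plain loop over that order classifying each node (one out = trunk, several outs = branch list assigned at once); same per-node classification, same asymptotic cost.
import Mathlib
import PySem

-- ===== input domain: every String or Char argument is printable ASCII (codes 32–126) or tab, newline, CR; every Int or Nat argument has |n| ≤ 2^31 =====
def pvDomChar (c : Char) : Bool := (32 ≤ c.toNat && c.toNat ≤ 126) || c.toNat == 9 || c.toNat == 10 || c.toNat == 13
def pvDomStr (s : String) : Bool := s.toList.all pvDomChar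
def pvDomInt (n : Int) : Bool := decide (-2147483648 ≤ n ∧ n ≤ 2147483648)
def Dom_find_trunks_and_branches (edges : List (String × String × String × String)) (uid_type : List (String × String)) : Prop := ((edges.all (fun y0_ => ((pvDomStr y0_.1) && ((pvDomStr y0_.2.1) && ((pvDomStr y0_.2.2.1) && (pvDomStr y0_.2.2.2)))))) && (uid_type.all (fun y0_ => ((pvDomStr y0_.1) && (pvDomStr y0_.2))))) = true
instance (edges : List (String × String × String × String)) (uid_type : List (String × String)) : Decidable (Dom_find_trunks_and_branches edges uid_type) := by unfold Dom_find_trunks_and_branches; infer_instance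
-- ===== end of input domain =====

-- B replaces A's recursive classify-while-walking dfs by two separate passes: an
-- iterative stack traversal collecting the DFS preorder, then a plain loop over that
-- order classifying each node; objective: alternative decomposition, same cost.

-- ===== PORT A =====
-- shared helper (Source B keeps build_directed_graph verbatim, so both ports use it):
-- graph[enda].append((eq_uid, endb, etype)) over dict(edges).items()
def build_directed_graph (edges : List (String × String × String × String)) :
    PySem.Dict String (List (String × String × String)) :=
  (PySem.Dict.ofList edges).items.foldl
    (fun g q => g.modify q.2.1 [] (· ++ [(q.1, q.2.2.1, q.2.2.2)]))
    PySem.Dict.empty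

-- the mutable state of A's dfs: (visited, trunks, branches)
structure DfsSt where
  visited : PySem.Set String
  trunks : PySem.Set String
  branches : PySem.Dict String (List String)
deriving Repr, DecidableEq

-- A's recursive dfs; the Nat is a totality guard only (fuel bounds the recursion
-- DEPTH; each nested call has newly visited its caller's node, so depth ≤ #keys + 1
-- and the fuel passed at the call site below is never exhausted)
def dfs_rec (g : PySem.Dict String (List (String × String × String))) :
    Nat → DfsSt → String → DfsSt
  | 0, st, _ => st
  | f+1, st, node =>
    if PySem.Set.contains st.visited node then st
    else
      let st1 : DfsSt := { st with visited := PySem.Set.add st.visited node }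
      match g.getD node [] with
      | [(pipe_uid, endb, _etype)] =>
          -- len(outs) == 1: trunk, continue
          dfs_rec g f { st1 with trunks := PySem.Set.add st1.trunks pipe_uid } endb
      | [] => st1
      | outs =>
          -- len(outs) > 1: branch point
          outs.foldl
            (fun s q =>
              dfs_rec g f { s with branches := s.branches.modify node [] (· ++ [q.1]) } q.2.1)
            st1

def find_trunks_and_branches (edges : List (String × String × String × String)) (uid_type : List (String × String)) : List String × (List (String × List String)) :=
  let graph := build_directed_graph edges
  let wells := ((PySem.Dict.ofList uid_type).items.filter (fun p => p.2 == "WELL")).map (·.1)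
  let st0 : DfsSt := ⟨PySem.Set.empty, PySem.Set.empty, PySem.Dict.empty⟩
  let st := wells.foldl (fun s w => dfs_rec graph (graph.size + 1) s w) st0
  (st.trunks, st.branches.items)

-- ===== PORT B =====
def sum_out (g : PySem.Dict String (List (String × String × String))) : Nat :=
  (g.items.map (fun p => p.2.length)).sum

-- Phase 1 of Source B: the while-loop collecting (seen, order); the Lean list holds the
-- stack TOP FIRST (python pops from the end of its list), so pushing reversed(outs)
-- is a fold consing the reversed outs. The Nat is a totality guard only (the loop
-- runs at most once per stack entry, bounded by the fuel supplied below).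
def pre_loop (g : PySem.Dict String (List (String × String × String))) :
    Nat → PySem.Set String → List String → List String → PySem.Set String × List String
  | 0, seen, order, _ => (seen, order)
  | _+1, seen, order, [] => (seen, order)
  | f+1, seen, order, node :: stack =>
    if PySem.Set.contains seen node then pre_loop g f seen order stack
    else
      pre_loop g f (PySem.Set.add seen node) (order ++ [node])
        ((g.getD node []).reverse.foldl (fun stk q => q.2.1 :: stk) stack)

-- Phase 2 of Source B: per-node classification (1 out → trunk pipe, >1 outs → branch list)
def classify_step (g : PySem.Dict String (List (String × String × String)))
    (st : PySem.Set String × PySem.Dict String (List String)) (node : String) :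
    PySem.Set String × PySem.Dict String (List String) :=
  match g.getD node [] with
  | [(pipe_uid, _, _)] => (PySem.Set.add st.1 pipe_uid, st.2)
  | [] => st
  | outs => (st.1, st.2.insert node (outs.map (·.1)))

def find_trunks_and_branches_alt (edges : List (String × String × String × String)) (uid_type : List (String × String)) : List String × (List (String × List String)) :=
  let graph := build_directed_graph edges
  -- python 'stack = wells[::-1]' popping from the END = wells in order, top first
  let wells := ((PySem.Dict.ofList uid_type).items.filter (fun p => p.2 == "WELL")).map (·.1)
  let fuel := wells.length + (graph.size + 1) * (sum_out graph + 1) + 1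
  let r := pre_loop graph fuel PySem.Set.empty [] wells
  let c := r.2.foldl (classify_step graph) (PySem.Set.empty, PySem.Dict.empty)
  (c.1, c.2.items)

-- ===== PRECONDITION & SPEC =====
def Spec_find_trunks_and_branches (edges : List (String × String × String × String)) (uid_type : List (String × String)) (out : List String × (List (String × List String))) : Prop := out = find_trunks_and_branches_alt edges uid_type
instance (edges : List (String × String × String × String)) (uid_type : List (String × String)) (out : List String × (List (String × List String))) : Decidable (Spec_find_trunks_and_branches edges uid_type out) := by unfold Spec_find_trunks_and_branches; infer_instance

-- ===== CLAIM (what is proved, stated in full; the proofs are below) =====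
def Claim_equal_find_trunks_and_branches : Prop := ∀ (edges : List (String × String × String × String)) (uid_type : List (String × String)), Dom_find_trunks_and_branches edges uid_type → Spec_find_trunks_and_branches edges uid_type (find_trunks_and_branches edges uid_type)

-- ===== LEMMAS AND PROOFS =====

abbrev Gr := PySem.Dict String (List (String × String × String))
abbrev ClSt := PySem.Set String × PySem.Dict String (List String)

/-- one branch append of A: `branches[n].append(p)` -/
def appB (n p : String) (s : DfsSt) : DfsSt :=
  { s with branches := s.branches.modify n [] (· ++ [p]) }

def appAll (n : String) (ps : List String) (s : DfsSt) : DfsSt :=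
  ps.foldl (fun s p => appB n p s) s

/-- number of graph keys not yet visited -/
def unvis (g : Gr) (vis : PySem.Set String) : Nat :=
  ((g.items.map Prod.fst).filter (fun k => !PySem.Set.contains vis k)).length

/-- proof-side recursive preorder collector (what A's dfs does to `visited`,
    with the visiting order made explicit) -/
def pre_rec (g : Gr) : Nat → PySem.Set String → String → PySem.Set String × List String
  | 0, s, _ => (s, [])
  | f+1, s, n =>
    if PySem.Set.contains s n then (s, [])
    else (g.getD n []).foldl
        (fun p q => ((pre_rec g f p.1 q.2.1).1, p.2 ++ (pre_rec g f p.1 q.2.1).2))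
        (PySem.Set.add s n, [n])

/-- termination measure for the stack loop -/
def measP (g : Gr) (seen : PySem.Set String) (stack : List String) : Nat :=
  stack.length + unvis g seen * (sum_out g + 1)

/-- canonical-fuel wrappers -/
def PREC (g : Gr) (s : PySem.Set String) (n : String) : PySem.Set String × List String :=
  pre_rec g (unvis g s + 1) s n
def LOOPP (g : Gr) (seen : PySem.Set String) (order : List String) (stack : List String) :
    PySem.Set String × List String :=
  pre_loop g (measP g seen stack + 1) seen order stack

/-- invariant of A's state: every branch key has been visited -/
def InvSt (st : DfsSt) : Prop :=
  ∀ k, st.branches.contains k = true → PySem.Set.contains st.visited k = true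

-- generic foldl lemmas
lemma foldl_inv {α β : Type} (P : β → Prop) (f : β → α → β) :
    ∀ (l : List α) (st : β), (∀ s a, a ∈ l → P s → P (f s a)) → P st → P (l.foldl f st) := by
  intro l
  induction l with
  | nil => intro st _ h0; simpa using h0
  | cons a tl ih =>
      intro st h h0
      simp only [List.foldl_cons]
      exact ih _ (fun s b hb hs => h s b (by simp [hb]) hs) (h st a (by simp) h0)

lemma foldl_congr_inv {α β : Type} (P : β → Prop) (f f' : β → α → β) :
    ∀ (l : List α) (st : β), P st → (∀ s a, a ∈ l → P s → P (f s a)) →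
      (∀ s a, a ∈ l → P s → f s a = f' s a) → l.foldl f st = l.foldl f' st := by
  intro l
  induction l with
  | nil => intro st _ _ _; rfl
  | cons a tl ih =>
      intro st h0 hpres heq
      simp only [List.foldl_cons]
      rw [← heq st a (by simp) h0]
      exact ih _ (hpres st a (by simp) h0)
        (fun s b hb hs => hpres s b (by simp [hb]) hs)
        (fun s b hb hs => heq s b (by simp [hb]) hs)

lemma foldl_comm_inv {α β : Type} (P : β → Prop) (f : β → α → β) (c : β → β) :
    ∀ (l : List α) (st : β), P st → (∀ s a, a ∈ l → P s → P (f s a)) →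
      (∀ s a, a ∈ l → P s → f (c s) a = c (f s a)) →
      l.foldl f (c st) = c (l.foldl f st) := by
  intro l
  induction l with
  | nil => intro st _ _ _; rfl
  | cons a tl ih =>
      intro st h0 hpres hcomm
      simp only [List.foldl_cons]
      rw [hcomm st a (by simp) h0]
      exact ih _ (hpres st a (by simp) h0)
        (fun s b hb hs => hpres s b (by simp [hb]) hs)
        (fun s b hb hs => hcomm s b (by simp [hb]) hs)

/-- generic accumulation: a fold whose state is (σ, accumulated list) and whose
    step only reads the first component appends independently of the accumulator -/
lemma foldl_pair_acc {α σ : Type} (h : σ → α → σ) (k : σ → α → List String) :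
    ∀ (l : List α) (s : σ) (o : List String),
      l.foldl (fun p q => (h p.1 q, p.2 ++ k p.1 q)) (s, o)
      = ((l.foldl (fun p q => (h p.1 q, p.2 ++ k p.1 q)) (s, [])).1,
         o ++ (l.foldl (fun p q => (h p.1 q, p.2 ++ k p.1 q)) (s, [])).2) := by
  intro l
  induction l with
  | nil => intro s o; simp
  | cons q tl ih =>
      intro s o
      simp only [List.foldl_cons]
      rw [ih (h s q) (o ++ k s q), ih (h s q) ([] ++ k s q)]
      simp

-- small set / list facts
lemma set_contains_add_self (s : PySem.Set String) (x : String) :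
    (PySem.Set.add s x).contains x = true := by
  simp only [PySem.Set.add, PySem.Set.contains]
  split <;> simp_all

lemma set_contains_add_of (s : PySem.Set String) (x y : String)
    (h : PySem.Set.contains s y = true) : (PySem.Set.add s x).contains y = true := by
  simp only [PySem.Set.add, PySem.Set.contains] at *
  split <;> simp_all

lemma filter_len_strict {α : Type} (p q : α → Bool) (h : ∀ x, q x = true → p x = true)
    (x0 : α) : ∀ (l : List α), x0 ∈ l → p x0 = true → q x0 = false →
    (l.filter q).length < (l.filter p).length := by
  intro l
  induction l with
  | nil => simp
  | cons a tl ih =>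
    intro hmem hp hq
    rcases List.mem_cons.mp hmem with rfl | hmem'
    · have hle : (tl.filter q).length ≤ (tl.filter p).length :=
        (List.monotone_filter_right tl h).length_le
      simp [hp, hq]
      omega
    · have := ih hmem' hp hq
      by_cases hqa : q a = true
      · simp [hqa, h a hqa]; omega
      · simp at hqa
        by_cases hpa : p a = true
        · simp [hqa, hpa]; omega
        · simp at hpa; simp [hqa, hpa]; omega

lemma insert_comm_of_contains {ν : Type} (d : PySem.Dict String ν) (n e : String)
    (vn ve : ν) (hne : n ≠ e) (hc : d.contains n = true) :
    (d.insert n vn).insert e ve = (d.insert e ve).insert n vn := by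
  have hen : e ≠ n := fun h => hne h.symm
  by_cases hce : d.contains e = true
  · apply PySem.Dict.ext
    have h1 : (d.insert n vn).contains e = true := by
      rw [PySem.Dict.contains_insert]; simp [hce]
    have h2 : (d.insert e ve).contains n = true := by
      rw [PySem.Dict.contains_insert]; simp [hc]
    rw [PySem.Dict.items_insert_of_contains _ _ h1,
        PySem.Dict.items_insert_of_contains _ _ hc,
        PySem.Dict.items_insert_of_contains _ _ h2,
        PySem.Dict.items_insert_of_contains _ _ hce]
    simp only [List.map_map]
    apply List.map_congr_left
    intro p _
    by_cases h1 : p.1 = n <;> by_cases h2 : p.1 = e <;>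
      simp [Function.comp, h1, h2, hne, hen]
  · have hce' : d.contains e = false := by simpa using hce
    have h1 : (d.insert n vn).contains e = false := by
      rw [PySem.Dict.contains_insert]; simp [hce', hen]
    have h2 : (d.insert e ve).contains n = true := by
      rw [PySem.Dict.contains_insert]; simp [hc]
    apply PySem.Dict.ext
    rw [PySem.Dict.items_insert_of_not_contains _ _ h1,
        PySem.Dict.items_insert_of_contains _ _ hc,
        PySem.Dict.items_insert_of_contains _ _ h2,
        PySem.Dict.items_insert_of_not_contains _ _ hce']
    simp [List.map_append, hen]

lemma modify_comm {ν : Type} (d : PySem.Dict String ν) (n e : String) (d0 d1 : ν)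
    (f h : ν → ν) (hne : n ≠ e) (hc : d.contains n = true) :
    (d.modify n d0 f).modify e d1 h = (d.modify e d1 h).modify n d0 f := by
  have hen : e ≠ n := fun hh => hne hh.symm
  simp only [PySem.Dict.modify]
  rw [PySem.Dict.getD_insert_of_ne _ _ _ hen, PySem.Dict.getD_insert_of_ne _ _ _ hne]
  exact insert_comm_of_contains d n e _ _ hne hc

lemma dict_insert_insert_self {ν : Type} (d : PySem.Dict String ν) (k : String) (v w : ν) :
    (d.insert k v).insert k w = d.insert k w := by
  apply PySem.Dict.ext
  by_cases hc : d.contains k = true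
  · rw [PySem.Dict.items_insert_of_contains _ _
        (by rw [PySem.Dict.contains_insert]; simp [hc]),
        PySem.Dict.items_insert_of_contains _ _ hc,
        PySem.Dict.items_insert_of_contains _ _ hc]
    simp only [List.map_map]
    apply List.map_congr_left
    intro p _
    by_cases h : p.1 = k <;> simp [Function.comp, h]
  · have hc' : d.contains k = false := by simpa using hc
    have hnk : ∀ p ∈ d.items, (p.1 == k) = false := by
      intro p hp
      by_contra hbad
      apply hc
      simp only [PySem.Dict.contains, List.any_eq_true]
      exact ⟨p, hp, by simpa using hbad⟩
    rw [PySem.Dict.items_insert_of_contains _ _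
        (by rw [PySem.Dict.contains_insert]; simp),
        PySem.Dict.items_insert_of_not_contains _ _ hc',
        PySem.Dict.items_insert_of_not_contains _ _ hc']
    rw [List.map_append]
    have hid : List.map (fun p => if (p.1 == k) = true then (k, w) else p) d.items
        = List.map id d.items := by
      apply List.map_congr_left
      intro p hp
      simp [hnk p hp]
    rw [hid, List.map_id]
    simp

lemma getD_ne_nil_contains (g : Gr) (node : String)
    (h : g.getD node [] ≠ []) : g.contains node = true := by
  rw [PySem.Dict.contains_eq_isSome_get?]
  rw [PySem.Dict.getD_eq_get?_getD] at h
  cases hg : g.get? node <;> simp [hg] at h ⊢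

lemma mem_keys_of_contains (g : Gr) (node : String)
    (h : g.contains node = true) : node ∈ g.items.map Prod.fst := by
  simp only [PySem.Dict.contains, List.any_eq_true] at h
  obtain ⟨p, hp, hpe⟩ := h
  simp at hpe
  exact List.mem_map.mpr ⟨p, hp, by simp [hpe]⟩

lemma out_le_sum (g : Gr) (node : String) :
    (g.getD node []).length ≤ sum_out g := by
  show _ ≤ (g.items.map (fun p => p.2.length)).sum
  rw [PySem.Dict.getD_eq_get?_getD]
  cases hg : g.get? node with
  | none => simp
  | some v =>
      simp only [Option.getD_some]
      have : (node, v) ∈ g.items := by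
        simp only [PySem.Dict.get?] at hg
        obtain ⟨p, hp, hfind⟩ := Option.map_eq_some_iff.mp hg
        have hmem := List.mem_of_find?_eq_some hp
        have hpred := List.find?_some hp
        simp at hpred
        cases p with
        | mk a b =>
          simp at hfind hpred
          subst hpred; subst hfind; exact hmem
      exact List.le_sum_of_mem (List.mem_map.mpr ⟨(node, v), this, rfl⟩)

lemma unvis_le_size (g : Gr) (vis : PySem.Set String) : unvis g vis ≤ g.size := by
  have h1 := List.length_filter_le (fun k => !PySem.Set.contains vis k) (g.items.map Prod.fst)
  simpa [unvis, PySem.Dict.size] using h1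

lemma unvis_mono_of_vis {g : Gr} {s t : PySem.Set String}
    (h : ∀ x, PySem.Set.contains s x = true → PySem.Set.contains t x = true) :
    unvis g t ≤ unvis g s := by
  apply List.Sublist.length_le
  apply List.monotone_filter_right
  intro a ha
  simp only [Bool.not_eq_eq_eq_not, Bool.not_true] at ha ⊢
  cases hs : PySem.Set.contains s a
  · rfl
  · rw [h a hs] at ha; exact ha

lemma unvis_add_lt (g : Gr) (vis : PySem.Set String) (node : String)
    (hk : g.contains node = true) (hv : PySem.Set.contains vis node = false) :
    unvis g (PySem.Set.add vis node) < unvis g vis := by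
  apply filter_len_strict
  · intro x hx
    simp only [Bool.not_eq_eq_eq_not, Bool.not_true] at hx ⊢
    cases hs : PySem.Set.contains vis x
    · rfl
    · rw [set_contains_add_of _ _ _ hs] at hx; exact hx
  · exact mem_keys_of_contains g node hk
  · simpa using hv
  · simp

lemma vis_mono (g : Gr) :
    ∀ (f : Nat) (st : DfsSt) (n x : String),
      PySem.Set.contains st.visited x = true →
      PySem.Set.contains (dfs_rec g f st n).visited x = true := by
  intro f
  induction f with
  | zero => intro st n x h; simpa [dfs_rec] using h
  | succ f ih =>
    intro st n x h
    rw [dfs_rec]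
    by_cases hv : PySem.Set.contains st.visited n = true
    · rw [if_pos hv]; exact h
    · rw [if_neg hv]
      rcases houts : g.getD n [] with _ | ⟨⟨p, e, t⟩, _ | ⟨q, tl⟩⟩ <;>
        simp only [houts]
      · exact set_contains_add_of _ _ _ h
      · exact ih _ _ _ (set_contains_add_of _ _ _ h)
      · exact foldl_inv (fun s : DfsSt => PySem.Set.contains s.visited x = true) _ _ _
          (fun s a _ hs => ih _ _ _ hs) (set_contains_add_of _ _ _ h)

lemma br_mono (g : Gr) :
    ∀ (f : Nat) (st : DfsSt) (n k : String),
      st.branches.contains k = true →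
      (dfs_rec g f st n).branches.contains k = true := by
  intro f
  induction f with
  | zero => intro st n k h; simpa [dfs_rec] using h
  | succ f ih =>
    intro st n k h
    rw [dfs_rec]
    by_cases hv : PySem.Set.contains st.visited n = true
    · rw [if_pos hv]; exact h
    · rw [if_neg hv]
      rcases houts : g.getD n [] with _ | ⟨⟨p, e, t⟩, _ | ⟨q, tl⟩⟩ <;>
        simp only [houts]
      · exact h
      · exact ih _ _ _ h
      · refine foldl_inv (fun s : DfsSt => s.branches.contains k = true) _ _ _ ?_ h
        intro s a _ hs
        apply ih
        simp only [PySem.Dict.modify, PySem.Dict.contains_insert, hs, Bool.or_true]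

lemma rev_push (stk : List String) (l : List (String × String × String)) :
    l.reverse.foldl (fun s q => q.2.1 :: s) stk = l.map (fun q => q.2.1) ++ stk := by
  induction l with
  | nil => rfl
  | cons x tl ih => simp [List.foldl_append, ih]

-- commuting a pending branch append past a dfs run
lemma dfs_rec_appB (g : Gr) :
    ∀ (f : Nat) (st : DfsSt) (e n p : String),
      PySem.Set.contains st.visited n = true → st.branches.contains n = true →
      dfs_rec g f (appB n p st) e = appB n p (dfs_rec g f st e) := by
  intro f
  induction f with
  | zero => intro st e n p _ _; rfl
  | succ f ih =>
    intro st e n p hvn hbn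
    rw [dfs_rec, dfs_rec]
    simp only [appB]
    by_cases hve : PySem.Set.contains st.visited e = true
    · rw [if_pos hve, if_pos hve]
    · have hne : n ≠ e := by
        intro hh
        apply hve
        rw [← hh]
        exact hvn
      rw [if_neg hve, if_neg hve]
      cases houts : g.getD e [] with
      | nil => simp only [houts]
      | cons hd tl =>
        obtain ⟨p', e', t'⟩ := hd
        cases tl with
        | nil =>
          simp only [houts]
          exact ih (DfsSt.mk (PySem.Set.add st.visited e) (PySem.Set.add st.trunks p')
            st.branches) e' n p (set_contains_add_of _ _ _ hvn) hbn
        | cons qq tl' =>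
          simp only [houts]
          refine foldl_comm_inv
            (fun s : DfsSt => PySem.Set.contains s.visited n = true ∧
              PySem.Set.contains s.visited e = true ∧ s.branches.contains n = true)
            _ (fun s : DfsSt => { s with branches := s.branches.modify n [] (· ++ [p]) })
            _ ({ visited := PySem.Set.add st.visited e, trunks := st.trunks,
                 branches := st.branches } : DfsSt)
            ⟨set_contains_add_of _ _ _ hvn, set_contains_add_self _ _, hbn⟩ ?_ ?_
          · intro s a _ hs
            obtain ⟨h1, h2, h3⟩ := hs
            refine ⟨vis_mono g f _ a.2.1 n h1, vis_mono g f _ a.2.1 e h2, ?_⟩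
            apply br_mono
            simp only [PySem.Dict.modify, PySem.Dict.contains_insert, h3, Bool.or_true]
          · intro s a _ hs
            obtain ⟨h1, h2, h3⟩ := hs
            have hcomm := modify_comm s.branches n e [] [] (· ++ [p]) (· ++ [a.1]) hne h3
            show dfs_rec g f
                { visited := s.visited, trunks := s.trunks,
                  branches := (s.branches.modify n [] (· ++ [p])).modify e [] (· ++ [a.1]) }
                a.2.1 = _
            rw [hcomm]
            exact ih { s with branches := s.branches.modify e [] (· ++ [a.1]) } a.2.1 n p h1
              (by simp only [PySem.Dict.modify, PySem.Dict.contains_insert, h3, Bool.or_true])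

lemma dfs_rec_appAll (g : Gr) :
    ∀ (ps : List String) (f : Nat) (st : DfsSt) (e n : String),
      PySem.Set.contains st.visited n = true → st.branches.contains n = true →
      dfs_rec g f (appAll n ps st) e = appAll n ps (dfs_rec g f st e) := by
  intro ps
  induction ps with
  | nil => intro f st e n _ _; rfl
  | cons pp ps ih =>
    intro f st e n hvn hbn
    show dfs_rec g f (appAll n ps (appB n pp st)) e = appAll n ps (appB n pp (dfs_rec g f st e))
    rw [← dfs_rec_appB g f st e n pp hvn hbn]
    exact ih f (appB n pp st) e n hvn
      (by simp only [appB, PySem.Dict.modify, PySem.Dict.contains_insert, hbn, Bool.or_true])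

lemma visited_appB (n p : String) (s : DfsSt) : (appB n p s).visited = s.visited := rfl

lemma contains_appB (n p : String) (s : DfsSt) : (appB n p s).branches.contains n = true := by
  simp [appB, PySem.Dict.modify, PySem.Dict.contains_insert]

-- appAll on a fresh key is a plain insert
lemma appB_fresh (n p : String) (st : DfsSt) (h : st.branches.contains n = false) :
    appB n p st = { st with branches := st.branches.insert n [p] } := by
  simp [appB, PySem.Dict.modify, PySem.Dict.getD_of_not_contains _ _ h]

lemma appAll_acc (n : String) :
    ∀ (ps acc : List String) (st : DfsSt),
      appAll n ps { st with branches := st.branches.insert n acc }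
        = { st with branches := st.branches.insert n (acc ++ ps) } := by
  intro ps
  induction ps with
  | nil => intro acc st; simp [appAll]
  | cons p ps ih =>
      intro acc st
      show appAll n ps (appB n p { st with branches := st.branches.insert n acc }) = _
      have hstep : appB n p { st with branches := st.branches.insert n acc }
          = { st with branches := st.branches.insert n (acc ++ [p]) } := by
        simp only [appB, PySem.Dict.modify, PySem.Dict.getD_insert_self]
        rw [dict_insert_insert_self]
      rw [hstep, ih (acc ++ [p]) st]
      simp

lemma appAll_fresh (n p : String) (ps : List String) (st : DfsSt)
    (h : st.branches.contains n = false) :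
    appAll n (p :: ps) st = { st with branches := st.branches.insert n (p :: ps) } := by
  show appAll n ps (appB n p st) = _
  rw [appB_fresh n p st h]
  have := appAll_acc n ps [p] st
  simpa using this

-- the invariant is preserved by A's dfs
lemma Inv_dfs (g : Gr) :
    ∀ (f : Nat) (st : DfsSt) (n : String), InvSt st → InvSt (dfs_rec g f st n) := by
  intro f
  induction f with
  | zero => intro st n h; simpa [dfs_rec] using h
  | succ f ih =>
    intro st n h
    rw [dfs_rec]
    by_cases hv : PySem.Set.contains st.visited n = true
    · rw [if_pos hv]; exact h
    · rw [if_neg hv]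
      have h1 : InvSt { st with visited := PySem.Set.add st.visited n } := by
        intro k hk
        exact set_contains_add_of _ _ _ (h k hk)
      rcases houts : g.getD n [] with _ | ⟨⟨p, e, t⟩, _ | ⟨q, tl⟩⟩ <;> simp only [houts]
      · exact h1
      · exact ih _ _ h1
      · have := foldl_inv
          (fun s : DfsSt => InvSt s ∧ PySem.Set.contains s.visited n = true)
          (fun s q => dfs_rec g f { s with branches := s.branches.modify n [] (· ++ [q.1]) } q.2.1)
          ((p, e, t) :: q :: tl)
          { st with visited := PySem.Set.add st.visited n }
          ?_ ⟨h1, set_contains_add_self _ _⟩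
        · exact this.1
        · intro s a _ hs
          obtain ⟨hsi, hsn⟩ := hs
          constructor
          · apply ih
            intro k hk
            simp only [PySem.Dict.modify, PySem.Dict.contains_insert] at hk
            rcases Bool.or_eq_true_iff.mp hk with hkn | hkb
            · have hkn' : k = n := by simpa using hkn
              rw [hkn']; exact hsn
            · exact hsi k hkb
          · exact vis_mono g f _ a.2.1 n hsn

-- pre_rec accumulation / monotonicity / fuel independence
lemma pre_fold_acc (g : Gr) (f : Nat) (l : List (String × String × String))
    (s : PySem.Set String) (o : List String) :
    l.foldl (fun p q => ((pre_rec g f p.1 q.2.1).1, p.2 ++ (pre_rec g f p.1 q.2.1).2)) (s, o)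
    = ((l.foldl (fun p q => ((pre_rec g f p.1 q.2.1).1, p.2 ++ (pre_rec g f p.1 q.2.1).2)) (s, [])).1,
       o ++ (l.foldl (fun p q => ((pre_rec g f p.1 q.2.1).1, p.2 ++ (pre_rec g f p.1 q.2.1).2)) (s, [])).2) :=
  foldl_pair_acc (fun s q => (pre_rec g f s q.2.1).1) (fun s q => (pre_rec g f s q.2.1).2) l s o

lemma pre_vis_mono (g : Gr) :
    ∀ (f : Nat) (s : PySem.Set String) (n x : String),
      PySem.Set.contains s x = true →
      PySem.Set.contains (pre_rec g f s n).1 x = true := by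
  intro f
  induction f with
  | zero => intro s n x h; simpa [pre_rec] using h
  | succ f ih =>
    intro s n x h
    rw [pre_rec]
    by_cases hv : PySem.Set.contains s n = true
    · rw [if_pos hv]; exact h
    · rw [if_neg hv]
      exact foldl_inv
        (fun p : PySem.Set String × List String => PySem.Set.contains p.1 x = true)
        _ _ _ (fun p a _ hp => ih _ _ _ hp) (set_contains_add_of _ _ _ h)

lemma pre_unvis_le (g : Gr) (f : Nat) (s : PySem.Set String) (n : String) :
    unvis g (pre_rec g f s n).1 ≤ unvis g s :=
  unvis_mono_of_vis (fun x hx => pre_vis_mono g f s n x hx)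

lemma pre_rec_fuel (g : Gr) :
    ∀ (f f' : Nat) (s : PySem.Set String) (n : String),
      unvis g s < f → unvis g s < f' → pre_rec g f s n = pre_rec g f' s n := by
  intro f
  induction f with
  | zero => intro f' s n h _; omega
  | succ f ih =>
    intro f' s n h h'
    cases f' with
    | zero => omega
    | succ f' =>
      rw [pre_rec, pre_rec]
      by_cases hv : PySem.Set.contains s n = true
      · rw [if_pos hv, if_pos hv]
      · rw [if_neg hv, if_neg hv]
        have hvf : PySem.Set.contains s n = false := by
          cases hcc : PySem.Set.contains s n
          · rfl
          · exact absurd hcc hv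
        cases houts : g.getD n [] with
        | nil => rfl
        | cons hd tl =>
          have hk : g.contains n = true := getD_ne_nil_contains g n (by simp [houts])
          have hlt : unvis g (PySem.Set.add s n) < unvis g s := unvis_add_lt g s n hk hvf
          refine foldl_congr_inv
            (fun p : PySem.Set String × List String => unvis g p.1 < unvis g s)
            _ _ _ _ hlt ?_ ?_
          · intro p a _ hp
            calc unvis g (pre_rec g f p.1 a.2.1).1 ≤ unvis g p.1 := pre_unvis_le g f p.1 a.2.1
              _ < unvis g s := hp
          · intro p a _ hp
            rw [ih f' p.1 a.2.1 (by omega) (by omega)]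

-- classify_step reductions
lemma classify_nil (g : Gr) (st : ClSt) (n : String) (h : g.getD n [] = []) :
    classify_step g st n = st := by
  unfold classify_step
  rw [h]

lemma classify_one (g : Gr) (st : ClSt) (n p e t : String) (h : g.getD n [] = [(p, e, t)]) :
    classify_step g st n = (PySem.Set.add st.1 p, st.2) := by
  unfold classify_step
  rw [h]

lemma classify_many (g : Gr) (st : ClSt) (n : String) (q1 q2 : String × String × String)
    (tl : List (String × String × String)) (h : g.getD n [] = q1 :: q2 :: tl) :
    classify_step g st n = (st.1, st.2.insert n ((q1 :: q2 :: tl).map (·.1))) := by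
  unfold classify_step
  rw [h]

-- A's interleaved branch appends can all be done up front
lemma interleave (g : Gr) (f : Nat) (n : String) :
    ∀ (outs : List (String × String × String)) (s : DfsSt),
      PySem.Set.contains s.visited n = true →
      outs.foldl
        (fun s q => dfs_rec g f { s with branches := s.branches.modify n [] (· ++ [q.1]) } q.2.1)
        s
      = outs.foldl (fun s q => dfs_rec g f s q.2.1) (appAll n (outs.map (·.1)) s) := by
  intro outs
  induction outs with
  | nil => intro s _; rfl
  | cons q tl ih =>
      intro s hvn
      simp only [List.foldl_cons, List.map_cons]
      have hY : PySem.Set.contains (dfs_rec g f (appB n q.1 s) q.2.1).visited n = true := by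
        apply vis_mono
        rw [visited_appB]
        exact hvn
      have step1 := ih (dfs_rec g f (appB n q.1 s) q.2.1) hY
      have step2 : appAll n (tl.map (·.1)) (dfs_rec g f (appB n q.1 s) q.2.1)
          = dfs_rec g f (appAll n (tl.map (·.1)) (appB n q.1 s)) q.2.1 :=
        (dfs_rec_appAll g (tl.map (·.1)) f (appB n q.1 s) q.2.1 n
          (by rw [visited_appB]; exact hvn) (contains_appB n q.1 s)).symm
      have hfirst : dfs_rec g f { s with branches := s.branches.modify n [] (· ++ [q.1]) } q.2.1
          = dfs_rec g f (appB n q.1 s) q.2.1 := rfl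
      rw [hfirst, step1, step2]
      rfl

-- THE BRIDGE: A's dfs = preorder collection followed by per-node classification
lemma bridge (g : Gr) :
    ∀ (f : Nat) (st : DfsSt) (n : String), InvSt st →
      dfs_rec g f st n =
        ⟨(pre_rec g f st.visited n).1,
         ((pre_rec g f st.visited n).2.foldl (classify_step g) (st.trunks, st.branches)).1,
         ((pre_rec g f st.visited n).2.foldl (classify_step g) (st.trunks, st.branches)).2⟩ := by
  intro f
  induction f with
  | zero => intro st n _; rfl
  | succ f ih =>
    have FOLD : ∀ (l : List (String × String × String)) (s : DfsSt), InvSt s →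
        l.foldl (fun s q => dfs_rec g f s q.2.1) s =
          ⟨(l.foldl (fun p q => ((pre_rec g f p.1 q.2.1).1, p.2 ++ (pre_rec g f p.1 q.2.1).2)) (s.visited, [])).1,
           ((l.foldl (fun p q => ((pre_rec g f p.1 q.2.1).1, p.2 ++ (pre_rec g f p.1 q.2.1).2)) (s.visited, [])).2.foldl
              (classify_step g) (s.trunks, s.branches)).1,
           ((l.foldl (fun p q => ((pre_rec g f p.1 q.2.1).1, p.2 ++ (pre_rec g f p.1 q.2.1).2)) (s.visited, [])).2.foldl
              (classify_step g) (s.trunks, s.branches)).2⟩ := by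
      intro l
      induction l with
      | nil => intro s _; rfl
      | cons q tl ihl =>
          intro s hs
          have hinv2 : InvSt (dfs_rec g f s q.2.1) := Inv_dfs g f s q.2.1 hs
          rw [ih s q.2.1 hs] at hinv2
          simp only [List.foldl_cons]
          rw [ih s q.2.1 hs, ihl _ hinv2]
          simp only
          rw [pre_fold_acc g f tl (pre_rec g f s.visited q.2.1).1
            ([] ++ (pre_rec g f s.visited q.2.1).2)]
          simp [List.foldl_append]
    intro st n hst
    rw [dfs_rec, pre_rec]
    by_cases hv : PySem.Set.contains st.visited n = true
    · rw [if_pos hv, if_pos hv]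
      rfl
    · rw [if_neg hv, if_neg hv]
      have hvf : PySem.Set.contains st.visited n = false := by
        cases hcc : PySem.Set.contains st.visited n
        · rfl
        · exact absurd hcc hv
      rcases houts : g.getD n [] with _ | ⟨⟨p, e, t⟩, _ | ⟨q2, tl⟩⟩
      · -- no outs
        simp only [houts, List.foldl_nil, List.foldl_cons, List.nil_append,
          classify_nil g _ n houts]
      · -- single out: trunk
        simp only [houts, List.foldl_cons, List.foldl_nil, List.nil_append]
        have hInv1 : InvSt (DfsSt.mk (PySem.Set.add st.visited n)
            (PySem.Set.add st.trunks p) st.branches) := by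
          intro k hk
          exact set_contains_add_of _ _ _ (hst k hk)
        rw [ih _ e hInv1]
        have hsingle : [n] ++ (pre_rec g f (PySem.Set.add st.visited n) e).2
            = n :: (pre_rec g f (PySem.Set.add st.visited n) e).2 := by simp
        rw [hsingle]
        simp only [List.foldl_cons, classify_one g _ n p e t houts]
      · -- branch point
        simp only [houts]
        have hfresh : st.branches.contains n = false := by
          cases hcc : st.branches.contains n
          · rfl
          · exact absurd (hst n hcc) hv
        have hcab := interleave g f n ((p, e, t) :: q2 :: tl)
          (DfsSt.mk (PySem.Set.add st.visited n) st.trunks st.branches)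
          (set_contains_add_self _ _)
        rw [hcab]
        simp only [List.map_cons]
        rw [appAll_fresh n p (q2.1 :: tl.map (fun x => x.1))
          (DfsSt.mk (PySem.Set.add st.visited n) st.trunks st.branches) hfresh]
        have hInv2 : InvSt (DfsSt.mk (PySem.Set.add st.visited n) st.trunks
            (st.branches.insert n (p :: q2.1 :: tl.map (fun x => x.1)))) := by
          intro k hk
          simp only [PySem.Dict.contains_insert] at hk
          rcases Bool.or_eq_true_iff.mp hk with hkn | hkb
          · have hkn' : k = n := by simpa using hkn
            rw [hkn']
            exact set_contains_add_self _ _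
          · exact set_contains_add_of _ _ _ (hst k hkb)
        rw [FOLD _ _ hInv2]
        simp only
        rw [pre_fold_acc g f ((p, e, t) :: q2 :: tl) (PySem.Set.add st.visited n) [n]]
        have hcons : [n] ++ (((p, e, t) :: q2 :: tl).foldl
            (fun p q => ((pre_rec g f p.1 q.2.1).1, p.2 ++ (pre_rec g f p.1 q.2.1).2))
            (PySem.Set.add st.visited n, [])).2
            = n :: (((p, e, t) :: q2 :: tl).foldl
            (fun p q => ((pre_rec g f p.1 q.2.1).1, p.2 ++ (pre_rec g f p.1 q.2.1).2))
            (PySem.Set.add st.visited n, [])).2 := by simp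
        rw [hcons]
        simp only [List.foldl_cons, classify_many g _ n (p, e, t) q2 tl houts, List.map_cons]

-- B's stack loop: fuel independence, one-pop simulation, fold characterisation
lemma pre_loop_fuel (g : Gr) :
    ∀ (f f' : Nat) (seen : PySem.Set String) (order stack : List String),
      measP g seen stack < f → measP g seen stack < f' →
      pre_loop g f seen order stack = pre_loop g f' seen order stack := by
  intro f
  induction f with
  | zero => intro f' seen order stack h _; omega
  | succ f ih =>
    intro f' seen order stack h h'
    cases f' with
    | zero => omega
    | succ f' =>
      cases stack with
      | nil => rw [pre_loop, pre_loop]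
      | cons node rest =>
        have hM : rest.length + 1 + unvis g seen * (sum_out g + 1) < f + 1 := by
          have hh : (node :: rest).length + unvis g seen * (sum_out g + 1) < f + 1 := h
          simpa using hh
        have hM' : rest.length + 1 + unvis g seen * (sum_out g + 1) < f' + 1 := by
          have hh : (node :: rest).length + unvis g seen * (sum_out g + 1) < f' + 1 := h'
          simpa using hh
        rw [pre_loop, pre_loop]
        by_cases hv : PySem.Set.contains seen node = true
        · rw [if_pos hv, if_pos hv]
          apply ih <;>
            (show rest.length + unvis g seen * (sum_out g + 1) < _) <;> omega
        · rw [if_neg hv, if_neg hv]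
          have hvf : PySem.Set.contains seen node = false := by
            cases hcc : PySem.Set.contains seen node
            · rfl
            · exact absurd hcc hv
          have hu : unvis g (PySem.Set.add seen node) ≤ unvis g seen :=
            unvis_mono_of_vis (fun x hx => set_contains_add_of _ _ _ hx)
          have hmono := Nat.mul_le_mul_right (k := sum_out g + 1) hu
          cases houts : g.getD node [] with
          | nil =>
            simp only [List.reverse_nil, List.foldl_nil]
            apply ih <;>
              (show rest.length + unvis g (PySem.Set.add seen node) * (sum_out g + 1) < _) <;>
              omega
          | cons hd tl =>
            have hk : g.contains node = true := getD_ne_nil_contains g node (by simp [houts])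
            have hlt : unvis g (PySem.Set.add seen node) < unvis g seen :=
              unvis_add_lt g seen node hk hvf
            have hstep : (unvis g (PySem.Set.add seen node) + 1) * (sum_out g + 1)
                ≤ unvis g seen * (sum_out g + 1) :=
              Nat.mul_le_mul_right (k := sum_out g + 1) hlt
            have hexp : (unvis g (PySem.Set.add seen node) + 1) * (sum_out g + 1)
                = unvis g (PySem.Set.add seen node) * (sum_out g + 1) + (sum_out g + 1) := by
              ring
            have hout := out_le_sum g node
            rw [houts] at hout
            rw [rev_push]
            apply ih <;>
              · show ((hd :: tl).map (fun q => q.2.1) ++ rest).length +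
                  unvis g (PySem.Set.add seen node) * (sum_out g + 1) < _
                simp only [List.length_append, List.length_map, List.length_cons] at *
                omega

lemma ploop_step (g : Gr) :
    ∀ (u : Nat) (seen : PySem.Set String), unvis g seen ≤ u →
      ∀ (order : List String) (n : String) (rest : List String),
        LOOPP g seen order (n :: rest)
          = LOOPP g (PREC g seen n).1 (order ++ (PREC g seen n).2) rest := by
  intro u
  induction u using Nat.strong_induction_on with
  | _ u IH =>
    intro seen hu order n rest
    rw [LOOPP, pre_loop]
    by_cases hv : PySem.Set.contains seen n = true
    · rw [if_pos hv]
      have hp : PREC g seen n = (seen, []) := by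
        rw [PREC, pre_rec, if_pos hv]
      rw [hp]
      simp only [List.append_nil]
      rw [LOOPP]
      apply pre_loop_fuel
      · show measP g seen rest < measP g seen (n :: rest)
        simp only [measP, List.length_cons]
        omega
      · omega
    · rw [if_neg hv]
      have hvf : PySem.Set.contains seen n = false := by
        cases hcc : PySem.Set.contains seen n
        · rfl
        · exact absurd hcc hv
      have hu1 : unvis g (PySem.Set.add seen n) ≤ unvis g seen :=
        unvis_mono_of_vis (fun x hx => set_contains_add_of _ _ _ hx)
      have hmono := Nat.mul_le_mul_right (k := sum_out g + 1) hu1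
      have hpre : PREC g seen n = (g.getD n []).foldl
          (fun p q => ((pre_rec g (unvis g seen) p.1 q.2.1).1,
            p.2 ++ (pre_rec g (unvis g seen) p.1 q.2.1).2))
          (PySem.Set.add seen n, [n]) := by
        rw [PREC, pre_rec, if_neg hv]
      cases houts : g.getD n [] with
      | nil =>
        rw [houts] at hpre
        simp only [List.foldl_nil] at hpre
        rw [hpre]
        simp only [List.reverse_nil, List.foldl_nil]
        rw [LOOPP]
        apply pre_loop_fuel
        · show rest.length + unvis g (PySem.Set.add seen n) * (sum_out g + 1)
            < measP g seen (n :: rest)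
          simp only [measP, List.length_cons]
          omega
        · omega
      | cons hd tl =>
        have hk : g.contains n = true := getD_ne_nil_contains g n (by simp [houts])
        have hlt : unvis g (PySem.Set.add seen n) < unvis g seen :=
          unvis_add_lt g seen n hk hvf
        have hstep : (unvis g (PySem.Set.add seen n) + 1) * (sum_out g + 1)
            ≤ unvis g seen * (sum_out g + 1) :=
          Nat.mul_le_mul_right (k := sum_out g + 1) hlt
        have hexp : (unvis g (PySem.Set.add seen n) + 1) * (sum_out g + 1)
            = unvis g (PySem.Set.add seen n) * (sum_out g + 1) + (sum_out g + 1) := by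
          ring
        have hout := out_le_sum g n
        rw [houts] at hout
        rw [rev_push]
        have hconv : pre_loop g (measP g seen (n :: rest)) (PySem.Set.add seen n)
            (order ++ [n]) ((hd :: tl).map (fun q => q.2.1) ++ rest)
            = LOOPP g (PySem.Set.add seen n) (order ++ [n])
                ((hd :: tl).map (fun q => q.2.1) ++ rest) := by
          rw [LOOPP]
          apply pre_loop_fuel <;>
            · show ((hd :: tl).map (fun q => q.2.1) ++ rest).length +
                unvis g (PySem.Set.add seen n) * (sum_out g + 1) < _
              simp only [measP, List.length_append, List.length_map, List.length_cons] at *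
              omega
        rw [hconv]
        have MST : ∀ (l : List (String × String × String)) (seen' : PySem.Set String)
            (order' rest' : List String), unvis g seen' < u →
            LOOPP g seen' order' (l.map (fun q => q.2.1) ++ rest')
              = LOOPP g
                  (l.foldl (fun p q => ((PREC g p.1 q.2.1).1, p.2 ++ (PREC g p.1 q.2.1).2))
                    (seen', order')).1
                  (l.foldl (fun p q => ((PREC g p.1 q.2.1).1, p.2 ++ (PREC g p.1 q.2.1).2))
                    (seen', order')).2
                  rest' := by
          intro l
          induction l with
          | nil => intro seen' order' rest' _; simp
          | cons q tl' ihl =>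
              intro seen' order' rest' hlt'
              simp only [List.map_cons, List.cons_append, List.foldl_cons]
              rw [IH (unvis g seen') hlt' seen' (le_refl _) order' q.2.1
                (tl'.map (fun q => q.2.1) ++ rest')]
              exact ihl (PREC g seen' q.2.1).1 (order' ++ (PREC g seen' q.2.1).2) rest'
                (lt_of_le_of_lt (pre_unvis_le g (unvis g seen' + 1) seen' q.2.1) hlt')
        rw [MST (hd :: tl) (PySem.Set.add seen n) (order ++ [n]) rest
          (lt_of_lt_of_le hlt hu)]
        have hfix : (hd :: tl).foldl
            (fun p q => ((PREC g p.1 q.2.1).1, p.2 ++ (PREC g p.1 q.2.1).2))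
            (PySem.Set.add seen n, order ++ [n])
            = (hd :: tl).foldl
            (fun p q => ((pre_rec g (unvis g seen) p.1 q.2.1).1,
              p.2 ++ (pre_rec g (unvis g seen) p.1 q.2.1).2))
            (PySem.Set.add seen n, order ++ [n]) := by
          refine foldl_congr_inv
            (fun p : PySem.Set String × List String =>
              unvis g p.1 ≤ unvis g (PySem.Set.add seen n))
            _ _ _ _ (le_refl _) ?_ ?_
          · intro p a _ hp
            exact le_trans (pre_unvis_le g (unvis g p.1 + 1) p.1 a.2.1) hp
          · intro p a _ hp
            rw [PREC, pre_rec_fuel g (unvis g p.1 + 1) (unvis g seen) p.1 a.2.1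
              (by omega) (by omega)]
        rw [hfix, hpre, houts]
        rw [pre_fold_acc g (unvis g seen) (hd :: tl) (PySem.Set.add seen n) (order ++ [n]),
            pre_fold_acc g (unvis g seen) (hd :: tl) (PySem.Set.add seen n) [n]]
        simp [List.append_assoc]

lemma ploop_fold (g : Gr) :
    ∀ (ws : List String) (seen : PySem.Set String) (order : List String),
      LOOPP g seen order ws
        = ws.foldl (fun p w => ((PREC g p.1 w).1, p.2 ++ (PREC g p.1 w).2)) (seen, order) := by
  intro ws
  induction ws with
  | nil => intro seen order; rw [LOOPP, pre_loop]; rfl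
  | cons w ws ih =>
      intro seen order
      rw [ploop_step g (unvis g seen) seen (le_refl _) order w ws, ih]
      rfl

-- the top-level fold over the wells, classified
lemma wstep_acc (g : Gr) (F : Nat) (l : List String) (s : PySem.Set String) (o : List String) :
    l.foldl (fun p w => ((pre_rec g F p.1 w).1, p.2 ++ (pre_rec g F p.1 w).2)) (s, o)
    = ((l.foldl (fun p w => ((pre_rec g F p.1 w).1, p.2 ++ (pre_rec g F p.1 w).2)) (s, [])).1,
       o ++ (l.foldl (fun p w => ((pre_rec g F p.1 w).1, p.2 ++ (pre_rec g F p.1 w).2)) (s, [])).2) :=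
  foldl_pair_acc (fun s w => (pre_rec g F s w).1) (fun s w => (pre_rec g F s w).2) l s o

lemma wfold (g : Gr) (F : Nat) :
    ∀ (ws : List String) (st : DfsSt), InvSt st →
      ws.foldl (fun s w => dfs_rec g F s w) st =
        ⟨(ws.foldl (fun p w => ((pre_rec g F p.1 w).1, p.2 ++ (pre_rec g F p.1 w).2)) (st.visited, [])).1,
         ((ws.foldl (fun p w => ((pre_rec g F p.1 w).1, p.2 ++ (pre_rec g F p.1 w).2)) (st.visited, [])).2.foldl
            (classify_step g) (st.trunks, st.branches)).1,
         ((ws.foldl (fun p w => ((pre_rec g F p.1 w).1, p.2 ++ (pre_rec g F p.1 w).2)) (st.visited, [])).2.foldl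
            (classify_step g) (st.trunks, st.branches)).2⟩ := by
  intro ws
  induction ws with
  | nil => intro st _; rfl
  | cons w ws ih =>
      intro st hst
      have hinv2 : InvSt (dfs_rec g F st w) := Inv_dfs g F st w hst
      rw [bridge g F st w hst] at hinv2
      simp only [List.foldl_cons]
      rw [bridge g F st w hst, ih _ hinv2]
      simp only
      rw [wstep_acc g F ws (pre_rec g F st.visited w).1 ([] ++ (pre_rec g F st.visited w).2)]
      simp [List.foldl_append]

-- the whole pipeline, for any graph and well list
lemma main_eq (g : Gr) (ws : List String) :
    (ws.foldl (fun s w => dfs_rec g (g.size + 1) s w)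
        (⟨PySem.Set.empty, PySem.Set.empty, PySem.Dict.empty⟩ : DfsSt)).trunks
      = ((pre_loop g (ws.length + (g.size + 1) * (sum_out g + 1) + 1)
            PySem.Set.empty [] ws).2.foldl (classify_step g)
            (PySem.Set.empty, PySem.Dict.empty)).1
    ∧ (ws.foldl (fun s w => dfs_rec g (g.size + 1) s w)
        (⟨PySem.Set.empty, PySem.Set.empty, PySem.Dict.empty⟩ : DfsSt)).branches
      = ((pre_loop g (ws.length + (g.size + 1) * (sum_out g + 1) + 1)
            PySem.Set.empty [] ws).2.foldl (classify_step g)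
            (PySem.Set.empty, PySem.Dict.empty)).2 := by
  have hInv0 : InvSt (⟨PySem.Set.empty, PySem.Set.empty, PySem.Dict.empty⟩ : DfsSt) := by
    intro k hk
    simp [PySem.Dict.contains, PySem.Dict.empty] at hk
  have hfuel : measP g PySem.Set.empty ws
      < ws.length + (g.size + 1) * (sum_out g + 1) + 1 := by
    have h1 := unvis_le_size g PySem.Set.empty
    have h2 : unvis g PySem.Set.empty * (sum_out g + 1) ≤ g.size * (sum_out g + 1) :=
      Nat.mul_le_mul_right _ h1
    have h3 : (g.size + 1) * (sum_out g + 1)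
        = g.size * (sum_out g + 1) + (sum_out g + 1) := by ring
    show ws.length + unvis g PySem.Set.empty * (sum_out g + 1) < _
    omega
  have hB : pre_loop g (ws.length + (g.size + 1) * (sum_out g + 1) + 1)
      PySem.Set.empty [] ws = LOOPP g PySem.Set.empty [] ws := by
    rw [LOOPP]
    exact pre_loop_fuel g _ _ _ _ _ hfuel (Nat.lt_succ_self _)
  have hfix : ws.foldl (fun p w => ((PREC g p.1 w).1, p.2 ++ (PREC g p.1 w).2))
      (PySem.Set.empty, ([] : List String))
      = ws.foldl (fun p w => ((pre_rec g (g.size + 1) p.1 w).1,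
          p.2 ++ (pre_rec g (g.size + 1) p.1 w).2)) (PySem.Set.empty, []) := by
    refine foldl_congr_inv (fun _ => True) _ _ _ _ trivial (fun _ _ _ _ => trivial) ?_
    intro p a _ _
    rw [PREC, pre_rec_fuel g (unvis g p.1 + 1) (g.size + 1) p.1 a
      (Nat.lt_succ_self _) (by have := unvis_le_size g p.1; omega)]
  rw [hB, ploop_fold g ws PySem.Set.empty [], hfix,
    wfold g (g.size + 1) ws _ hInv0]
  exact ⟨rfl, rfl⟩

-- ===== VERDICT (by name: the statement is the Claim_ definition above) =====
theorem find_trunks_and_branches_spec : Claim_equal_find_trunks_and_branches := by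
  intro edges uid_type _
  show find_trunks_and_branches edges uid_type = find_trunks_and_branches_alt edges uid_type
  have h := main_eq (build_directed_graph edges)
    (((PySem.Dict.ofList uid_type).items.filter (fun p => p.2 == "WELL")).map (·.1))
  show ((_ : DfsSt).trunks, (_ : DfsSt).branches.items) = _
  rw [h.1, h.2]
  rfl
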